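-- pv_equiv track=rewrite | github.com/hfyeomans/AgentCoffee | AgentCoffee.py | coffee_taste
-- ===== SOURCE A (Python) =====
-- def coffee_taste(taste_preferences):
--     # List of possible taste preference keywords
--     taste_keywords = [
--         'strong', 'bold', 'intense', 'mild', 'creamy', 'smooth',
--         'frothy', 'balanced', 'rich', 'diluted', 'chocolatey',
--         'less acidic', 'full-bodied', 'robust', 'clean', 'bright',
--         'aromatic', 'thick'
--     ]
--     # Normalize the sentence to lower case and split into words
--     words = taste_preferences.lower().split()
--     # Extract keywords present in the sentence
--     taste_preferences = [word for word in words if word in taste_keywords]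
--
--     coffee_profiles = [
--         {'name': 'Espresso', 'notes': ['strong', 'bold', 'intense']},
--         {'name': 'Latte', 'notes': ['mild', 'creamy', 'smooth']},
--         {'name': 'Cappuccino', 'notes': ['frothy', 'balanced', 'rich']},
--         {'name': 'Americano', 'notes': ['smooth', 'diluted', 'bold']},
--         {'name': 'Cold Brew', 'notes': ['smooth', 'chocolatey', 'less acidic']},
--         {'name': 'French Press', 'notes': ['rich', 'full-bodied', 'robust']},
--         {'name': 'Pour Over', 'notes': ['clean', 'bright', 'aromatic']},
--         {'name': 'Turkish Coffee', 'notes': ['strong', 'thick', 'intense']},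
--     ]
--     recommendations = []
--     for coffee in coffee_profiles:
--         if any(pref.lower() in coffee['notes'] for pref in taste_preferences):
--             recommendations.append(coffee['name'])
--     return recommendations
-- ===== SOURCE B (Python) =====
-- # B: inverted index note -> coffee names, one pass over the words, emit in profile order.
-- def coffee_taste(taste_preferences):
--     coffee_profiles = [
--         {'name': 'Espresso', 'notes': ['strong', 'bold', 'intense']},
--         {'name': 'Latte', 'notes': ['mild', 'creamy', 'smooth']},
--         {'name': 'Cappuccino', 'notes': ['frothy', 'balanced', 'rich']},
--         {'name': 'Americano', 'notes': ['smooth', 'diluted', 'bold']},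
--         {'name': 'Cold Brew', 'notes': ['smooth', 'chocolatey', 'less acidic']},
--         {'name': 'French Press', 'notes': ['rich', 'full-bodied', 'robust']},
--         {'name': 'Pour Over', 'notes': ['clean', 'bright', 'aromatic']},
--         {'name': 'Turkish Coffee', 'notes': ['strong', 'thick', 'intense']},
--     ]
--     # Build the inverted index once: note keyword -> names of coffees listing it.
--     pairs = [(note, coffee['name']) for coffee in coffee_profiles for note in coffee['notes']]
--     index = {}
--     for note, name in pairs:
--         index[note] = index.get(note, []) + [name]
--     # Single scan over the sentence's words, unioning the hit coffees.
--     matched = set()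
--     for word in taste_preferences.lower().split():
--         matched.update(index.get(word, []))
--     # Emit in coffee_profiles order.
--     return [coffee['name'] for coffee in coffee_profiles if coffee['name'] in matched]
-- ===== Notes on version B (the rewrite author's own statement) =====
-- stated objective: alternative
-- what changed: Replaces A's keyword-filter pass plus a per-coffee any-scan of the filtered words by a prebuilt inverted index (note -> coffee names) and a single union pass over the sentence's words, emitting matches in coffee_profiles order.
import Mathlib
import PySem

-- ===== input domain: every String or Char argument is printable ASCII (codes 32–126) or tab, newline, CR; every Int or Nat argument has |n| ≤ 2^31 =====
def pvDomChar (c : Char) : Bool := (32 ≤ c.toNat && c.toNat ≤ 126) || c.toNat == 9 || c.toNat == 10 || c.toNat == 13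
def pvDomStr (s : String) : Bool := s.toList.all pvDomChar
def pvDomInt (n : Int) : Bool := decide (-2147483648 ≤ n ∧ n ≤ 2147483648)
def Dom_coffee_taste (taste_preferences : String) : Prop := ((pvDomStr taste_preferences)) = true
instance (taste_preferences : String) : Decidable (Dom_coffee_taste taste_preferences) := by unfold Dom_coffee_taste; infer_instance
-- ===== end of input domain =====

-- B replaces A's keyword-filter pass plus a per-coffee scan of the filtered words by a
-- prebuilt inverted index (note -> coffee names) and a single union pass over the words
-- (objective: alternative decomposition; no speed claim on these fixed-size tables).

-- ===== PORT A =====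
def aTasteKeywords : List String :=
  ["strong", "bold", "intense", "mild", "creamy", "smooth",
   "frothy", "balanced", "rich", "diluted", "chocolatey",
   "less acidic", "full-bodied", "robust", "clean", "bright",
   "aromatic", "thick"]

def aCoffeeProfiles : List (String × List String) :=
  [("Espresso", ["strong", "bold", "intense"]),
   ("Latte", ["mild", "creamy", "smooth"]),
   ("Cappuccino", ["frothy", "balanced", "rich"]),
   ("Americano", ["smooth", "diluted", "bold"]),
   ("Cold Brew", ["smooth", "chocolatey", "less acidic"]),
   ("French Press", ["rich", "full-bodied", "robust"]),
   ("Pour Over", ["clean", "bright", "aromatic"]),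
   ("Turkish Coffee", ["strong", "thick", "intense"])]

def coffee_taste (taste_preferences : String) : List String :=
  let words := PySem.Str.split₀ (PySem.Str.lower taste_preferences)
  let prefs := words.filter (fun word => aTasteKeywords.contains word)
  aCoffeeProfiles.foldl
    (fun recommendations coffee =>
      if prefs.any (fun pref => coffee.2.contains (PySem.Str.lower pref)) then
        recommendations ++ [coffee.1]
      else recommendations) []

-- ===== PORT B =====
def bCoffeeProfiles : List (String × List String) :=
  [("Espresso", ["strong", "bold", "intense"]),
   ("Latte", ["mild", "creamy", "smooth"]),
   ("Cappuccino", ["frothy", "balanced", "rich"]),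
   ("Americano", ["smooth", "diluted", "bold"]),
   ("Cold Brew", ["smooth", "chocolatey", "less acidic"]),
   ("French Press", ["rich", "full-bodied", "robust"]),
   ("Pour Over", ["clean", "bright", "aromatic"]),
   ("Turkish Coffee", ["strong", "thick", "intense"])]

def bPairs : List (String × String) :=
  bCoffeeProfiles.flatMap (fun coffee => coffee.2.map (fun note => (note, coffee.1)))

def bIndex : PySem.Dict String (List String) :=
  bPairs.foldl (fun d p => d.modify p.1 [] (· ++ [p.2])) PySem.Dict.empty

def coffee_taste_alt (taste_preferences : String) : List String :=
  let matched : PySem.Set String :=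
    (PySem.Str.split₀ (PySem.Str.lower taste_preferences)).foldl
      (fun m word => PySem.Set.update m (bIndex.getD word [])) PySem.Set.empty
  (bCoffeeProfiles.filter (fun coffee => PySem.Set.contains matched coffee.1)).map (·.1)

-- ===== PRECONDITION & SPEC =====
def Spec_coffee_taste (taste_preferences : String) (out : List String) : Prop := out = coffee_taste_alt taste_preferences
instance (taste_preferences : String) (out : List String) : Decidable (Spec_coffee_taste taste_preferences out) := by unfold Spec_coffee_taste; infer_instance

-- ===== CLAIM (what is proved, stated in full; the proofs are below) =====
def Claim_equal_coffee_taste : Prop := ∀ (taste_preferences : String), Dom_coffee_taste taste_preferences → Spec_coffee_taste taste_preferences (coffee_taste taste_preferences)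

-- ===== LEMMAS AND PROOFS =====

-- membership in the matched set built by B's word loop
theorem mem_foldl_update {α : Type} [BEq α] [LawfulBEq α] (f : String → List α)
    (l : List String) (s : PySem.Set α) (x : α) :
    x ∈ l.foldl (fun m w => PySem.Set.update m (f w)) s ↔ x ∈ s ∨ ∃ w ∈ l, x ∈ f w := by
  induction l generalizing s with
  | nil => simp
  | cons a t ih =>
      simp only [List.foldl_cons, ih, PySem.Set.mem_update, List.mem_cons]
      constructor
      · rintro ((h | h) | ⟨w, hw, hx⟩)
        · exact Or.inl h
        · exact Or.inr ⟨a, Or.inl rfl, h⟩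
        · exact Or.inr ⟨w, Or.inr hw, hx⟩
      · rintro (h | ⟨w, (rfl | hw), hx⟩)
        · exact Or.inl (Or.inl h)
        · exact Or.inl (Or.inr hx)
        · exact Or.inr ⟨w, hw, hx⟩

-- looking a word up in the inverted index finds exactly the (word, name) pairs
theorem mem_bIndex_getD (w n : String) :
    n ∈ bIndex.getD w [] ↔ (w, n) ∈ bPairs := by
  unfold bIndex
  rw [PySem.Dict.getD_foldl_modify_append]
  simp only [PySem.Dict.getD_empty, List.nil_append, List.mem_map, List.mem_filter,
    beq_iff_eq]
  constructor
  · rintro ⟨p, ⟨hp, rfl⟩, rfl⟩; exact hp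
  · intro h; exact ⟨(w, n), ⟨h, rfl⟩, rfl⟩

-- the per-coffee match conditions of A and B agree, for every word
set_option maxHeartbeats 2000000 in
theorem cond_iff (c : String × List String) (hc : c ∈ aCoffeeProfiles) (w : String) :
    (w ∈ aTasteKeywords ∧ PySem.Str.lower w ∈ c.2) ↔ (w, c.1) ∈ bPairs := by
  constructor
  · rintro ⟨hw, hl⟩
    have key : ∀ c ∈ aCoffeeProfiles, ∀ w ∈ aTasteKeywords,
        PySem.Str.lower w ∈ c.2 → (w, c.1) ∈ bPairs := by decide
    exact key c hc w hw hl
  · intro hp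
    have key : ∀ c ∈ aCoffeeProfiles, ∀ p ∈ bPairs,
        p.2 = c.1 → p.1 ∈ aTasteKeywords ∧ PySem.Str.lower p.1 ∈ c.2 := by decide
    exact key c hc (w, c.1) hp rfl

-- ===== VERDICT (by name: the statement is the Claim_ definition above) =====
set_option maxHeartbeats 2000000 in
theorem coffee_taste_spec : Claim_equal_coffee_taste := by
  intro s _
  unfold Spec_coffee_taste coffee_taste coffee_taste_alt
  rw [PySem.List.foldl_append_if]
  simp only [List.nil_append]
  have hprof : bCoffeeProfiles = aCoffeeProfiles := rfl
  rw [hprof]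
  congr 1
  apply List.filter_congr
  intro c hc
  rw [Bool.eq_iff_iff]
  simp only [List.any_eq_true, List.mem_filter, PySem.Set.contains_iff, mem_foldl_update,
    mem_bIndex_getD, List.contains_iff_mem]
  constructor
  · rintro ⟨w, ⟨hw, hkw⟩, hnotes⟩
    exact Or.inr ⟨w, hw, (cond_iff c hc w).mp ⟨hkw, hnotes⟩⟩
  · rintro (h | ⟨w, hw, hx⟩)
    · simp [PySem.Set.empty] at h
    · obtain ⟨hkw, hnotes⟩ := (cond_iff c hc w).mpr hx
      exact ⟨w, ⟨hw, hkw⟩, hnotes⟩
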